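-- pv_equiv track=rewrite | github.com/CavinKrenik/QRES | QRS.py | compress_qres_pattern
-- ===== SOURCE A (Python) =====
-- def compress_qres_pattern(relations):
--     """Compresses repeated patterns using run-length encoding logic."""
--     if not relations:
--         return []
--
--     compressed = []
--     count = 1
--     prev = relations[0]
--
--     for current in relations[1:]:
--         if current == prev:
--             count += 1
--         else:
--             if count > 1:
--                 compressed.append(f"repeat({prev},{count})")
--             else:
--                 compressed.append(prev)
--             prev = current
--             count = 1
--
--     # Append the final group
--     if count > 1:
--         compressed.append(f"repeat({prev},{count})")
--     else:
--         compressed.append(prev)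
--
--     return compressed
-- ===== SOURCE B (Python) =====
-- def compress_qres_pattern(relations):
--     """Compresses repeated patterns using run-length encoding logic."""
--     n = len(relations)
--     starts = [i for i in range(n) if i == 0 or relations[i] != relations[i - 1]]
--     ends = starts[1:] + [n]
--     out = []
--     for s, e in zip(starts, ends):
--         k = e - s
--         out.append(f"repeat({relations[s]},{k})" if k > 1 else relations[s])
--     return out
-- ===== Notes on version B (the rewrite author's own statement) =====
-- stated objective: alternative
-- what changed: Replaces A's prev/count state machine (with its separate trailing-flush branch) by a staged index pass: first collect the run-boundary indices where an element differs from its predecessor, then zip each boundary with the next one and obtain each run's length by subtraction.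
import Mathlib
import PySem

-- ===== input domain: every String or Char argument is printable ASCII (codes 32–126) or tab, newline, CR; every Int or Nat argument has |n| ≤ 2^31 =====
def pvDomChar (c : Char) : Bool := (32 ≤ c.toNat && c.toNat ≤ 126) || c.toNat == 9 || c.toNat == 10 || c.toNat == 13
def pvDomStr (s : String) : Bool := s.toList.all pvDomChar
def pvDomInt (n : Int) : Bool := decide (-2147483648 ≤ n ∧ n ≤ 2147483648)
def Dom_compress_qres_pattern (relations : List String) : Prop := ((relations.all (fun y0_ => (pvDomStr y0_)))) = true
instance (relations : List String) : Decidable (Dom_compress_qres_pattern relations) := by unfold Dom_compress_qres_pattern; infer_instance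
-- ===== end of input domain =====

-- B replaces A's prev/count state machine by a staged index pass (collect run-boundary
-- indices, then pair each boundary with the next and subtract); alternative, same cost.


-- ===== PORT A =====
-- emission of one finished group: f"repeat({prev},{count})" if count > 1 else prev
def qresEmitA (prev : String) (count : Int) : String :=
  if count > 1 then "repeat(" ++ prev ++ "," ++ PySem.Int.toStr count ++ ")" else prev

-- A's loop body: (compressed, count, prev) updated per current element
def qresStep (s : List String × Int × String) (current : String) : List String × Int × String :=
  if current == s.2.2 then (s.1, s.2.1 + 1, s.2.2)
  else (s.1 ++ [qresEmitA s.2.2 s.2.1], 1, current)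

def compress_qres_pattern (relations : List String) : List String :=
  match relations with
  | [] => []
  | p :: rest =>
    let st := rest.foldl qresStep ([], 1, p)
    st.1 ++ [qresEmitA st.2.2 st.2.1]

-- ===== PORT B =====
-- B's emission of one run of length count (a natural number here: a difference of indices)
def qresEmitB (prev : String) (count : Nat) : String :=
  if count > 1 then "repeat(" ++ prev ++ "," ++ PySem.Int.toStr (count : Int) ++ ")" else prev

-- Source B: starts = [i for i in range(n) if i == 0 or relations[i] != relations[i-1]]
-- (every index accessed is in range, so getD with a default is exact)
def qresStarts (relations : List String) : List Nat :=
  (List.range relations.length).filter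
    (fun i => i == 0 || !(relations.getD i "" == relations.getD (i - 1) ""))

-- Source B: ends = starts[1:] + [n]; out = [emit(relations[s], e-s) for s, e in zip(starts, ends)]
def compress_qres_pattern_alt (relations : List String) : List String :=
  let n := relations.length
  let starts := qresStarts relations
  let ends := starts.tail ++ [n]
  (starts.zip ends).map (fun se => qresEmitB (relations.getD se.1 "") (se.2 - se.1))

-- ===== PRECONDITION & SPEC =====
def Spec_compress_qres_pattern (relations : List String) (out : List String) : Prop := out = compress_qres_pattern_alt relations
instance (relations : List String) (out : List String) : Decidable (Spec_compress_qres_pattern relations out) := by unfold Spec_compress_qres_pattern; infer_instance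

-- ===== CLAIM (what is proved, stated in full; the proofs are below) =====
def Claim_equal_compress_qres_pattern : Prop := ∀ (relations : List String), Dom_compress_qres_pattern relations → Spec_compress_qres_pattern relations (compress_qres_pattern relations)

-- ===== LEMMAS AND PROOFS =====

-- proof-only canonical form: recursion over consecutive equal runs
def qresCanon : List String → List String
  | [] => []
  | x :: xs =>
    qresEmitA x (1 + ((xs.takeWhile (· == x)).length : Int))
      :: qresCanon (xs.dropWhile (· == x))
termination_by xs => xs.length
decreasing_by
  simpa using Nat.lt_succ_of_le (List.length_dropWhile_le _ xs)

-- ---- A = canon ----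

def qresRun (prev : String) (count : Int) : List String → List String
  | [] => [qresEmitA prev count]
  | c :: cs => if c == prev then qresRun prev (count + 1) cs
               else qresEmitA prev count :: qresRun c 1 cs

theorem qres_foldl_eq_run (xs : List String) :
    ∀ (acc : List String) (count : Int) (prev : String),
      (xs.foldl qresStep (acc, count, prev)).1
          ++ [qresEmitA (xs.foldl qresStep (acc, count, prev)).2.2
                (xs.foldl qresStep (acc, count, prev)).2.1]
        = acc ++ qresRun prev count xs := by
  induction xs with
  | nil => intro acc count prev; simp [qresRun]
  | cons c cs ih =>
    intro acc count prev
    by_cases h : (c == prev) = true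
    · simp [List.foldl_cons, qresStep, h, qresRun, ih]
    · simp only [List.foldl_cons, qresStep, h, Bool.false_eq_true, if_false, qresRun, ih]
      simp

theorem qresRun_eq_canon (xs : List String) :
    ∀ (count : Int) (prev : String),
      qresRun prev count xs
        = qresEmitA prev (count + ((xs.takeWhile (· == prev)).length : Int))
            :: qresCanon (xs.dropWhile (· == prev)) := by
  induction xs with
  | nil => intro count prev; simp [qresRun, qresCanon]
  | cons c cs ih =>
    intro count prev
    by_cases h : (c == prev) = true
    · simp only [qresRun, h, if_true, List.takeWhile_cons, List.dropWhile_cons, ih]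
      congr 2
      simp only [List.length_cons]
      push_cast
      omega
    · simp only [qresRun, h, Bool.false_eq_true, if_false, List.takeWhile_cons,
        List.dropWhile_cons, ih]
      rw [qresCanon]
      simp

theorem qresA_eq_canon (l : List String) : compress_qres_pattern l = qresCanon l := by
  cases l with
  | nil => simp [compress_qres_pattern, qresCanon]
  | cons p rest =>
    show (rest.foldl qresStep ([], 1, p)).1
        ++ [qresEmitA (rest.foldl qresStep ([], 1, p)).2.2
              (rest.foldl qresStep ([], 1, p)).2.1]
      = qresCanon (p :: rest)
    rw [qres_foldl_eq_run rest [] 1 p, qresRun_eq_canon, qresCanon]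
    simp

-- ---- B = canon ----

-- B's boundary predicate, named for the proofs
def qresP (l : List String) (i : Nat) : Bool :=
  i == 0 || !(l.getD i "" == l.getD (i - 1) "")

theorem qresStarts_eq (l : List String) :
    qresStarts l = (List.range l.length).filter (qresP l) := rfl

theorem qresEmitB_cast (p : String) (c : Nat) : qresEmitB p c = qresEmitA p (c : Int) := by
  unfold qresEmitB qresEmitA
  by_cases h : c > 1
  · have : (c : Int) > 1 := by exact_mod_cast h
    simp [h, this]
  · have : ¬ ((c : Int) > 1) := by exact_mod_cast h
    simp [h, this]

-- a filter over range k keeps only 0 when the predicate fails on 1..k-1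
theorem filter_range_single (q : Nat → Bool) :
    ∀ (k : Nat), 0 < k → q 0 = true → (∀ i, 0 < i → i < k → q i = false) →
      (List.range k).filter q = [0] := by
  intro k
  induction k with
  | zero => intro h; omega
  | succ j ih =>
    intro _ h0 hmid
    cases Nat.eq_zero_or_pos j with
    | inl hj => subst hj; simp [List.range_succ, h0]
    | inr hj =>
      rw [List.range_succ, List.filter_append, ih hj h0 (fun i hi hij => hmid i hi (by omega))]
      simp [hmid j hj (Nat.lt_succ_self j)]

theorem qres_getD_left {k : Nat} (x : String) (d : List String) {i : Nat} (h : i < k) :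
    (List.replicate k x ++ d).getD i "" = x := by
  rw [List.getD_append _ _ _ _ (by simpa using h)]
  exact List.getD_replicate x h

theorem qres_getD_right (k : Nat) (x : String) (d : List String) (j : Nat) :
    (List.replicate k x ++ d).getD (k + j) "" = d.getD j "" := by
  rw [List.getD_append_right _ _ _ _ (by simp)]
  simp

-- the boundary indices of (replicate k x ++ d) are 0 and d's boundaries shifted by k
theorem qresStarts_replicate_append (k : Nat) (x : String) (d : List String)
    (hk : 0 < k) (hd : ∀ y, d.head? = some y → (y == x) = false) :
    qresStarts (List.replicate k x ++ d) = 0 :: (qresStarts d).map (fun s => k + s) := by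
  rw [qresStarts_eq, qresStarts_eq]
  have hlen : (List.replicate k x ++ d).length = k + d.length := by simp
  rw [hlen, List.range_add, List.filter_append]
  have h1 : (List.range k).filter (qresP (List.replicate k x ++ d)) = [0] := by
    apply filter_range_single _ k hk
    · simp [qresP]
    · intro i hi hik
      simp only [qresP, qres_getD_left x d hik,
        qres_getD_left x d (show i - 1 < k by omega)]
      simp [Nat.pos_iff_ne_zero.mp hi]
  have h2 : (List.map (fun s => k + s) (List.range d.length)).filter
        (qresP (List.replicate k x ++ d))
      = List.map (fun s => k + s) ((List.range d.length).filter (qresP d)) := by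
    rw [List.filter_map]
    congr 1
    apply List.filter_congr
    intro j hj
    have hjm : j < d.length := List.mem_range.mp hj
    simp only [Function.comp]
    cases j with
    | zero =>
      obtain ⟨y, ys, rfl⟩ : ∃ y ys, d = y :: ys := by
        cases d with
        | nil => simp at hjm
        | cons y ys => exact ⟨y, ys, rfl⟩
      have hy := hd y rfl
      simp only [qresP, Nat.add_zero]
      have hk1 : k + 0 - 1 < k := by omega
      rw [show k + 0 - 1 = k - 1 by omega] at *
      simp only [qres_getD_left x (y :: ys) (show k - 1 < k by omega)]
      simp [hy]
    | succ j' =>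
      simp only [qresP, qres_getD_right k x d (j' + 1)]
      rw [show k + (j' + 1) - 1 = k + j' by omega, qres_getD_right k x d j',
        show j' + 1 - 1 = j' by omega]
      simp
  rw [h1, h2]
  rfl

-- the cons decomposition of starts
theorem qresStarts_cons (x : String) (xs : List String) :
    qresStarts (x :: xs)
      = 0 :: (qresStarts (xs.dropWhile (· == x))).map
          (fun s => ((xs.takeWhile (· == x)).length + 1) + s) := by
  set t := xs.takeWhile (· == x) with ht
  set d := xs.dropWhile (· == x) with hdd
  have hrep : x :: xs = List.replicate (t.length + 1) x ++ d := by
    have htr : t = List.replicate t.length x := by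
      rw [List.eq_replicate_iff]
      refine ⟨rfl, fun b hb => ?_⟩
      exact eq_of_beq (List.mem_takeWhile_imp (p := (· == x)) hb)
    calc x :: xs = x :: (t ++ d) := by rw [ht, hdd, List.takeWhile_append_dropWhile]
    _ = (x :: t) ++ d := rfl
    _ = List.replicate (t.length + 1) x ++ d := by
        rw [List.replicate_succ, ← htr]
  rw [hrep]
  apply qresStarts_replicate_append _ _ _ (by omega)
  intro y hy
  have := List.head?_dropWhile_not (· == x) xs
  rw [← hdd, hy] at this
  exact this

-- every boundary index is in range
theorem qresStarts_lt (l : List String) : ∀ s ∈ qresStarts l, s < l.length := by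
  intro s hs
  rw [qresStarts_eq] at hs
  exact List.mem_range.mp (List.mem_of_mem_filter hs)

theorem qresB_eq_canon : ∀ (l : List String), compress_qres_pattern_alt l = qresCanon l
  | [] => by simp [compress_qres_pattern_alt, qresStarts, qresCanon]
  | x :: xs => by
    have ih := qresB_eq_canon (xs.dropWhile (· == x))
    set t := xs.takeWhile (· == x) with ht
    set d := xs.dropWhile (· == x) with hdd
    set k := t.length + 1 with hk
    have hlen : (x :: xs).length = k + d.length := by
      have : t.length + d.length = xs.length := by
        rw [ht, hdd, ← List.length_append, List.takeWhile_append_dropWhile]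
      simp only [List.length_cons]; omega
    have hgd0 : (x :: xs).getD 0 "" = x := rfl
    have hgd : ∀ s, s < d.length → (x :: xs).getD (k + s) "" = d.getD s "" := by
      intro s hs
      have htr : t = List.replicate t.length x := by
        rw [List.eq_replicate_iff]
        refine ⟨rfl, fun b hb => ?_⟩
        exact eq_of_beq (List.mem_takeWhile_imp (p := (· == x)) hb)
      have hrep : x :: xs = List.replicate k x ++ d := by
        calc x :: xs = x :: (t ++ d) := by rw [ht, hdd, List.takeWhile_append_dropWhile]
        _ = (x :: t) ++ d := rfl
        _ = List.replicate k x ++ d := by rw [hk, List.replicate_succ, ← htr]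
      rw [hrep]
      exact qres_getD_right k x d s
    unfold compress_qres_pattern_alt
    rw [qresStarts_cons x xs, ← ht, ← hdd, ← hk, hlen]
    cases hds : qresStarts d with
    | nil =>
      -- then d has no boundaries, so d = []
      have hdnil : d = [] := by
        cases hd : d with
        | nil => rfl
        | cons y ys =>
          rw [hd] at hds
          rw [qresStarts_cons y ys] at hds
          simp at hds
      rw [qresCanon, ← ht, ← hdd, hdnil]
      simp only [List.map_nil, List.length_nil, Nat.add_zero, List.tail_cons,
        List.nil_append, List.zip_cons_cons, List.zip_nil_left, List.map_cons,
        List.map_nil]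
      rw [show qresCanon [] = [] from by simp [qresCanon]]
      congr 1
      show qresEmitB ((x :: xs).getD 0 "") (k - 0) = qresEmitA x (1 + (t.length : Int))
      rw [hgd0, qresEmitB_cast]
      congr 1
      omega
    | cons s0 T =>
      -- d is nonempty and its first boundary is 0
      have hs00 : s0 = 0 ∧ ∃ y ys, d = y :: ys := by
        cases hd : d with
        | nil => rw [hd] at hds; simp [qresStarts] at hds
        | cons y ys =>
          rw [hd, qresStarts_cons y ys] at hds
          exact ⟨(List.cons_eq_cons.mp hds).1.symm, y, ys, rfl⟩
      obtain ⟨rfl, y, ys, hd⟩ := hs00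
      rw [qresCanon, ← ht, ← hdd]
      simp only [List.map_cons, List.tail_cons, List.cons_append, List.zip_cons_cons,
        List.map_cons]
      congr 1
      · -- head: the first run
        show qresEmitB ((x :: xs).getD 0 "") (k + 0 - 0) = qresEmitA x (1 + (t.length : Int))
        rw [hgd0, qresEmitB_cast]
        congr 1
        omega
      · -- tail: shift lemma + IH
        show List.map (fun se => qresEmitB ((x :: xs).getD se.1 "") (se.2 - se.1))
            (((k + 0) :: List.map (fun s => k + s) T).zip
              (List.map (fun s => k + s) T ++ [k + d.length])) = qresCanon d
        have e2 : (List.map (fun s => k + s) T) ++ [k + d.length]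
            = List.map (fun s => k + s) (T ++ [d.length]) := by simp
        have e1 : ((k + 0) :: List.map (fun s => k + s) T)
            = List.map (fun s => k + s) (0 :: T) := by simp
        rw [e1, e2, List.zip_map, List.map_map]
        have hmem : ∀ p ∈ (0 :: T).zip (T ++ [d.length]),
            ((fun se => qresEmitB ((x :: xs).getD se.1 "") (se.2 - se.1)) ∘
              Prod.map (fun s => k + s) (fun s => k + s)) p
              = (fun se => qresEmitB (d.getD se.1 "") (se.2 - se.1)) p := by
          intro p hp
          obtain ⟨a, b⟩ := p
          have ha : a ∈ (0 :: T) := (List.of_mem_zip hp).1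
          have halt : a < d.length := by
            apply qresStarts_lt d
            rw [hds]; exact ha
          simp only [Function.comp, Prod.map]
          rw [hgd a halt, Nat.add_sub_add_left]
        rw [List.map_congr_left hmem, ← ih]
        simp only [compress_qres_pattern_alt, hds, List.tail_cons]
termination_by l => l.length
decreasing_by simpa using Nat.lt_succ_of_le (List.length_dropWhile_le _ xs)

-- ===== VERDICT (by name: the statement is the Claim_ definition above) =====
theorem compress_qres_pattern_spec : Claim_equal_compress_qres_pattern := by
  intro relations _
  unfold Spec_compress_qres_pattern
  rw [qresA_eq_canon, qresB_eq_canon]
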